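-- pv_equiv track=rewrite | github.com/syntra-vindevoy/python-1 | sentence.py | min_max_sentence
-- ===== SOURCE A (Python) =====
-- import string
--
-- def min_max_sentence(sentence: str):
--     min_char = max_char = None
--
--     for char in sentence:
--         if char in string.ascii_letters:
--             if min_char is None:
--                 min_char = max_char = char
--                 continue
--
--             if char < min_char:
--                 min_char = char
--                 continue
--
--             if char > max_char:
--                 max_char = char
--
--     return min_char, max_char
-- ===== SOURCE B (Python) =====
-- import string
--
-- def min_max_sentence(sentence: str):
--     letters = [c for c in sentence if c in string.ascii_letters]
--     if not letters:
--         return None, None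
--     return min(letters), max(letters)
-- ===== Notes on version B (the rewrite author's own statement) =====
-- stated objective: simpler
-- what changed: A's single pass with hand-maintained min/max accumulators and branch chain is replaced by a filter of the ASCII letters followed by the builtin min and max reductions with an explicit empty guard.
import Mathlib
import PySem

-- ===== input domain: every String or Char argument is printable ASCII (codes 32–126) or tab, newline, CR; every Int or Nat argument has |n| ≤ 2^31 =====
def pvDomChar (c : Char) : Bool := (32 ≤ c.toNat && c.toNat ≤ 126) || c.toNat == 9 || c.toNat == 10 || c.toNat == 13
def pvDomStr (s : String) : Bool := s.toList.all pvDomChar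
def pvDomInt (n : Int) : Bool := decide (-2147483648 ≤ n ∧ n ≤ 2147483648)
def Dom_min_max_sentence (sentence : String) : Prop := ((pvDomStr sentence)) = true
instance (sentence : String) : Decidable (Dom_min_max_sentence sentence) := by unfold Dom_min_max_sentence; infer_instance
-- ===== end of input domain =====

-- B replaces A's one-pass accumulator loop by filter-then-min/max reductions: simpler decomposition, same O(n) cost.


-- shared helper: 'char in string.ascii_letters' (exact: ascii_letters = a-z ++ A-Z)
def pvIsLetter (c : Char) : Bool := ('a' ≤ c && c ≤ 'z') || ('A' ≤ c && c ≤ 'Z')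

-- ===== PORT A =====
-- loop body of A: state (min_char, max_char), branches in A's order
def pvStepA (st : Option Char × Option Char) (c : Char) : Option Char × Option Char :=
  if pvIsLetter c then
    match st with
    | (none, _) => (some c, some c)
    | (some m, mx) =>
      if c < m then (some c, mx)
      else
        match mx with
        | some M => if M < c then (some m, some c) else (some m, some M)
        | none => (some m, none)
  else st

def min_max_sentence (sentence : String) : Option String × Option String :=
  let st := sentence.toList.foldl pvStepA (none, none)
  (st.1.map (fun c => String.ofList [c]), st.2.map (fun c => String.ofList [c]))

-- ===== PORT B =====
def min_max_sentence_alt (sentence : String) : Option String × Option String :=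
  let letters := sentence.toList.filter pvIsLetter
  if letters = [] then (none, none)
  else ((PySem.List.min? letters (fun c => c)).map (fun c => String.ofList [c]),
        (PySem.List.max? letters (fun c => c)).map (fun c => String.ofList [c]))

-- ===== PRECONDITION & SPEC =====
def Spec_min_max_sentence (sentence : String) (out : Option String × Option String) : Prop := out = min_max_sentence_alt sentence
instance (sentence : String) (out : Option String × Option String) : Decidable (Spec_min_max_sentence sentence out) := by unfold Spec_min_max_sentence; infer_instance

-- ===== CLAIM (what is proved, stated in full; the proofs are below) =====
def Claim_equal_min_max_sentence : Prop := ∀ (sentence : String), Dom_min_max_sentence sentence → Spec_min_max_sentence sentence (min_max_sentence sentence)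

-- ===== LEMMAS AND PROOFS =====

-- With both accumulators set and m ≤ M, A's loop computes the running min and max over the letters.
lemma foldA_some (l : List Char) : ∀ (m M : Char), m ≤ M →
    l.foldl pvStepA (some m, some M) =
      (some ((l.filter pvIsLetter).foldl min m), some ((l.filter pvIsLetter).foldl max M)) := by
  induction l with
  | nil => intro m M _; simp
  | cons c t ih =>
    intro m M hmM
    by_cases hc : pvIsLetter c = true
    · simp only [List.foldl_cons, List.filter_cons, hc, if_pos]
      simp only [pvStepA, hc, if_pos]
      by_cases h1 : c < m
      · rw [if_pos h1, ih c M (le_trans (le_of_lt h1) hmM)]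
        have h3 : min m c = c := min_eq_right (le_of_lt h1)
        have h4 : max M c = M := max_eq_left (le_trans (le_of_lt h1) hmM)
        rw [h3, h4]
      · by_cases h2 : M < c
        · rw [if_neg h1, if_pos h2, ih m c (le_trans hmM (le_of_lt h2))]
          have h3 : min m c = m := min_eq_left (le_trans hmM (le_of_lt h2))
          have h4 : max M c = c := max_eq_right (le_of_lt h2)
          rw [h3, h4]
        · rw [if_neg h1, if_neg h2, ih m M hmM]
          have h3 : min m c = m := min_eq_left (not_lt.mp h1)
          have h4 : max M c = M := max_eq_left (not_lt.mp h2)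
          rw [h3, h4]
    · simp only [List.foldl_cons, List.filter_cons, hc]
      simp only [pvStepA, hc, if_neg Bool.false_ne_true]
      exact ih m M hmM

lemma foldA_none (l : List Char) :
    l.foldl pvStepA (none, none) =
      (match l.filter pvIsLetter with
       | [] => (none, none)
       | x :: t => (some (t.foldl min x), some (t.foldl max x))) := by
  induction l with
  | nil => simp
  | cons c t ih =>
    by_cases hc : pvIsLetter c = true
    · simp only [List.foldl_cons, List.filter_cons, hc, if_pos]
      simp only [pvStepA, hc, if_pos]
      exact foldA_some t c c le_rfl
    · simp only [List.foldl_cons, List.filter_cons, hc]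
      simp only [pvStepA, hc, if_neg Bool.false_ne_true]
      exact ih

-- ===== VERDICT (by name: the statement is the Claim_ definition above) =====
theorem min_max_sentence_spec : Claim_equal_min_max_sentence := by
  intro sentence _
  unfold Spec_min_max_sentence min_max_sentence min_max_sentence_alt
  rw [foldA_none]
  cases h : sentence.toList.filter pvIsLetter with
  | nil => simp
  | cons x t =>
    simp only []
    rw [PySem.List.min?_id_cons, PySem.List.max?_id_cons]
    simp
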